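-- pv_equiv track=rewrite | github.com/yusuke-matsunaga/rtlgen | src/rtlgen/writer_base.py | calc_tab_list
-- ===== SOURCE A (Python) =====
-- def calc_tab_list(lines, n0=2):
--     """複数の行のタブ位置を合わせて出力するためのタブ位置を計算する
--
--     :param list[list[str]] lines: 要素のリスト
--     :param int n0: 先頭の字下げ位置
--     """
--
--     # 各行の要素数の最大値を求める．
--     n_elem = 0
--     for line in lines:
--         n = len(line)
--         n_elem = max(n_elem, n)
--
--     # 各位置の文字列の長さの最大値を求める．
--     n_list = [0 for _ in range(n_elem)]
--     for line in lines:
--         for i, w in enumerate(line):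
--             n = len(w)
--             n_list[i] = max(n_list[i], n)
--
--     # 長さを1増やす．
--     for i in range(n_elem - 1):
--         if n_list[i] > 0:
--             n_list[i] += 1
--
--     # 結果の tab_list を作る．
--     tab_list = []
--     tab_list.append(n0)
--     for i in range(1, n_elem):
--         n1 = n0 + n_list[i - 1]
--         tab_list.append(n1)
--         n0 = n1
--     return tab_list
-- ===== SOURCE B (Python) =====
-- def calc_tab_list(lines, n0=2):
--     """Column-major re-implementation: for each column (the last is never
--     needed) compute its maximum width directly and accumulate the tab stops
--     in a single pass, instead of four row-major passes over a width array."""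
--     n_elem = max((len(line) for line in lines), default=0)
--     tabs = [n0]
--     for i in range(n_elem - 1):
--         w = max(len(line[i]) for line in lines if i < len(line))
--         tabs.append(tabs[-1] + (w + 1 if w > 0 else 0))
--     return tabs
-- ===== Notes on version B (the rewrite author's own statement) =====
-- stated objective: simpler
-- what changed: Replaces A's four row-major passes over a mutable per-column width array (count columns, fill widths via enumerate, bump positive widths, then accumulate) with a single column-major loop that computes each needed column's maximum width directly and appends the next tab stop in the same pass.
import Mathlib
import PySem

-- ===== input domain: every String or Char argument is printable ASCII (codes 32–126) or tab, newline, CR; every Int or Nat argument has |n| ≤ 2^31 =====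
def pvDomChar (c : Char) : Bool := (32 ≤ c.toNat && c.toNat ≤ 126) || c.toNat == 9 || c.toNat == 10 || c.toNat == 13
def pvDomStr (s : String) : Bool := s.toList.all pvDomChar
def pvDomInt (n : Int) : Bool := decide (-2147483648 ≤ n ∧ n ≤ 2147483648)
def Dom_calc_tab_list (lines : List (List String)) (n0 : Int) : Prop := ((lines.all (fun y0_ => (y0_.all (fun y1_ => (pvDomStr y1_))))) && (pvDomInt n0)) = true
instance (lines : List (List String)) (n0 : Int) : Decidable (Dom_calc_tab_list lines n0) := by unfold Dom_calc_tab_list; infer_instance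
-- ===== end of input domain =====

-- B replaces A's four row-major passes over a mutable width array by one column-major pass
-- that accumulates the tab stops directly (objective: simpler decomposition, same cost).

-- ===== PORT A =====
-- Literal port of A.  `n_list[i]` reads/writes are always in range (i < len(line) ≤ n_elem),
-- so `getD i 0` / `set` is exact here.
def calc_tab_list (lines : List (List String)) (n0 : Int) : List Int :=
  let n_elem : Nat := lines.foldl (fun acc line => max acc line.length) 0
  let n_list : List Int := List.replicate n_elem 0
  let n_list : List Int := lines.foldl
    (fun nl line => line.zipIdx.foldl
      (fun nl wi => nl.set wi.2 (max (nl.getD wi.2 0) (wi.1.length : Int))) nl) n_list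
  let n_list : List Int := (List.range (n_elem - 1)).foldl
    (fun nl i => if nl.getD i 0 > 0 then nl.set i (nl.getD i 0 + 1) else nl) n_list
  let r := (List.range' 1 (n_elem - 1)).foldl
    (fun s i => let n1 := s.2 + n_list.getD (i - 1) 0; (s.1 ++ [n1], n1)) ([n0], n0)
  r.1

-- ===== PORT B =====
-- Port of Source B.  The nonempty-generator `max(len(line[i]) for line in lines if i < len(line))`
-- is ported as a fold with the `if` filter and initial value 0 (exact: lengths are ≥ 0 and the
-- generator is nonempty for every i the loop reaches); `line.getD i ""` is in range under the filter.
def calc_tab_list_alt (lines : List (List String)) (n0 : Int) : List Int :=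
  let n_elem : Nat := lines.foldl (fun acc line => max acc line.length) 0
  (List.range (n_elem - 1)).foldl
    (fun tabs i =>
      let w : Int := lines.foldl
        (fun a line => if i < line.length then max a ((line.getD i "").length : Int) else a) 0
      tabs ++ [tabs.getLastD 0 + (if w > 0 then w + 1 else 0)]) [n0]

-- ===== PRECONDITION & SPEC =====
def Spec_calc_tab_list (lines : List (List String)) (n0 : Int) (out : List Int) : Prop := out = calc_tab_list_alt lines n0
instance (lines : List (List String)) (n0 : Int) (out : List Int) : Decidable (Spec_calc_tab_list lines n0 out) := by unfold Spec_calc_tab_list; infer_instance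

-- ===== CLAIM (what is proved, stated in full; the proofs are below) =====
def Claim_equal_calc_tab_list : Prop := ∀ (lines : List (List String)) (n0 : Int), Dom_calc_tab_list lines n0 → Spec_calc_tab_list lines n0 (calc_tab_list lines n0)

-- ===== LEMMAS AND PROOFS =====

-- per-column maximum width (B's inner fold)
def pvColMax (lines : List (List String)) (i : Nat) : Int :=
  lines.foldl (fun a line => if i < line.length then max a ((line.getD i "").length : Int) else a) 0

theorem pvColMax_nonneg (lines : List (List String)) (i : Nat) : 0 ≤ pvColMax lines i := by
  unfold pvColMax
  suffices h : ∀ (a : Int), 0 ≤ a → 0 ≤ lines.foldl (fun a line => if i < line.length then max a ((line.getD i "").length : Int) else a) a from h 0 le_rfl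
  induction lines with
  | nil => intro a ha; exact ha
  | cons l ls ih =>
    intro a ha
    simp only [List.foldl_cons]
    apply ih
    split
    · exact le_trans ha (le_max_left _ _)
    · exact ha

theorem pv_getD_set (nl : List Int) (i j : Nat) (v : Int) :
    (nl.set i v).getD j 0 = if i = j ∧ j < nl.length then v else nl.getD j 0 := by
  by_cases h : i = j ∧ j < nl.length
  · obtain ⟨rfl, hlt⟩ := h
    simp [List.getD, hlt]
  · rw [if_neg h]
    by_cases hij : i = j
    · subst hij
      have hge : nl.length ≤ i := by omega
      simp [List.getD, Nat.not_lt.mpr hge]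
    · simp [List.getD, hij]

theorem pv_inner (line : List String) :
    ∀ (k : Nat) (nl : List Int), k + line.length ≤ nl.length →
    let r := (line.zipIdx k).foldl
      (fun nl wi => nl.set wi.2 (max (nl.getD wi.2 0) ((wi.1.length : Int)))) nl
    r.length = nl.length ∧ ∀ j, r.getD j 0 =
      if k ≤ j ∧ j < k + line.length then max (nl.getD j 0) (((line.getD (j - k) "").length : Int))
      else nl.getD j 0 := by
  induction line with
  | nil =>
    intro k nl _
    refine ⟨rfl, fun j => ?_⟩
    simp only [List.zipIdx_nil, List.foldl_nil, List.length_nil]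
    rw [if_neg (by omega)]
  | cons w ws ih =>
    intro k nl hlen
    simp only [List.zipIdx_cons, List.foldl_cons]
    have hlen' : (k+1) + ws.length ≤ (nl.set k (max (nl.getD k 0) ((w.length : Int)))).length := by
      simp only [List.length_set]
      simpa [Nat.add_comm, Nat.add_assoc, Nat.add_left_comm] using hlen
    obtain ⟨h1, h2⟩ := ih (k+1) (nl.set k (max (nl.getD k 0) ((w.length : Int)))) hlen'
    refine ⟨by simpa using h1, fun j => ?_⟩
    rw [h2 j, pv_getD_set]
    have hk : k < nl.length := by
      simp only [List.length_cons] at hlen; omega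
    by_cases hj : j = k
    · subst hj
      have hA : ¬(j+1 ≤ j ∧ j < (j+1) + ws.length) := by omega
      have hB : j = j ∧ j < nl.length := ⟨rfl, hk⟩
      have hC : j ≤ j ∧ j < j + (w :: ws).length := by simp
      rw [if_neg hA, if_pos hB, if_pos hC]
      simp
    · have hB : ¬(k = j ∧ j < nl.length) := fun h => hj h.1.symm
      by_cases hj2 : k+1 ≤ j ∧ j < (k+1) + ws.length
      · have hC : k ≤ j ∧ j < k + (w :: ws).length := by
          simp only [List.length_cons]; omega
        rw [if_pos hj2, if_pos hC, if_neg hB]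
        have he : j - k = (j - (k+1)) + 1 := by omega
        rw [he, List.getD_cons_succ]
      · have hC : ¬(k ≤ j ∧ j < k + (w :: ws).length) := by
          simp only [List.length_cons]; omega
        rw [if_neg hj2, if_neg hC, if_neg hB]

theorem pv_outer (lines : List (List String)) :
    ∀ (nl : List Int), (∀ line ∈ lines, line.length ≤ nl.length) →
    let r := lines.foldl
      (fun nl line => line.zipIdx.foldl
        (fun nl wi => nl.set wi.2 (max (nl.getD wi.2 0) ((wi.1.length : Int)))) nl) nl
    r.length = nl.length ∧ ∀ j, r.getD j 0 =
      lines.foldl (fun a line => if j < line.length then max a ((line.getD j "").length : Int) else a)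
        (nl.getD j 0) := by
  induction lines with
  | nil => intro nl _; exact ⟨rfl, fun j => rfl⟩
  | cons l ls ih =>
    intro nl hle
    simp only [List.foldl_cons]
    obtain ⟨h1, h2⟩ := pv_inner l 0 nl (by simpa using hle l (List.mem_cons_self))
    set nl' := (l.zipIdx 0).foldl
      (fun nl wi => nl.set wi.2 (max (nl.getD wi.2 0) ((wi.1.length : Int)))) nl with hnl'
    obtain ⟨g1, g2⟩ := ih nl' (by intro line hm; rw [h1]; exact hle line (List.mem_cons_of_mem _ hm))
    refine ⟨g1.trans h1, fun j => ?_⟩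
    rw [g2 j, h2 j]
    simp only [Nat.zero_add, Nat.zero_le, true_and, Nat.sub_zero]

-- the "+1" adjustment loop, pointwise
theorem pv_adj (m : Nat) (nl : List Int) (hm : m ≤ nl.length) :
    let r := (List.range m).foldl
      (fun nl i => if nl.getD i 0 > 0 then nl.set i (nl.getD i 0 + 1) else nl) nl
    r.length = nl.length ∧ ∀ j, r.getD j 0 =
      if j < m then (if nl.getD j 0 > 0 then nl.getD j 0 + 1 else nl.getD j 0) else nl.getD j 0 := by
  induction m with
  | zero => exact ⟨rfl, fun j => by simp⟩
  | succ m ih =>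
    obtain ⟨h1, h2⟩ := ih (by omega)
    simp only [List.range_succ, List.foldl_append, List.foldl_cons, List.foldl_nil]
    set r := (List.range m).foldl
      (fun nl i => if nl.getD i 0 > 0 then nl.set i (nl.getD i 0 + 1) else nl) nl with hr
    have hrm : r.getD m 0 = nl.getD m 0 := by rw [h2 m, if_neg (by omega)]
    constructor
    · split
      · simpa [List.length_set] using h1
      · exact h1
    · intro j
      have hgoal : (if r.getD m 0 > 0 then r.set m (r.getD m 0 + 1) else r).getD j 0 =
          if j < m + 1 then (if nl.getD j 0 > 0 then nl.getD j 0 + 1 else nl.getD j 0) else nl.getD j 0 := by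
        by_cases hjm : j = m
        · subst hjm
          split
          · rw [pv_getD_set, if_pos ⟨rfl, by omega⟩, hrm]
            rw [hrm] at *
            rw [if_pos (by omega), if_pos (by assumption)]
          · rw [hrm, if_pos (by omega), if_neg (by rw [hrm] at *; omega)]
        · have hno : (if r.getD m 0 > 0 then r.set m (r.getD m 0 + 1) else r).getD j 0 = r.getD j 0 := by
            split
            · rw [pv_getD_set, if_neg (by intro h; exact hjm h.1.symm)]
            · rfl
          rw [hno, h2 j]
          by_cases hj : j < m
          · rw [if_pos hj, if_pos (show j < m + 1 by omega)]
          · rw [if_neg hj, if_neg (show ¬ j < m + 1 by omega)]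
      exact hgoal

-- adjusted step value used by both final loops
def pvStep (lines : List (List String)) (i : Nat) : Int :=
  if pvColMax lines i > 0 then pvColMax lines i + 1 else 0

-- the two final accumulation loops agree
theorem pv_tabs (g : Nat → Int) (n0 : Int) (m : Nat) :
    let a := (List.range' 1 m).foldl
      (fun s i => let n1 := s.2 + g (i - 1); (s.1 ++ [n1], n1)) (([n0], n0) : List Int × Int)
    let b := (List.range m).foldl
      (fun tabs i => tabs ++ [tabs.getLastD 0 + g i]) [n0]
    a.1 = b ∧ a.2 = b.getLastD 0 := by
  induction m with
  | zero => exact ⟨rfl, rfl⟩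
  | succ m ih =>
    obtain ⟨h1, h2⟩ := ih
    have hr' : List.range' 1 (m + 1) = List.range' 1 m ++ [1 + m] := List.range'_1_concat
    rw [List.range_succ, hr']
    simp only [List.foldl_append, List.foldl_cons, List.foldl_nil]
    constructor
    · rw [h1, h2]
      have : 1 + m - 1 = m := by omega
      rw [this]
    · rw [h2]
      have : 1 + m - 1 = m := by omega
      rw [this, List.getLastD_concat]

theorem pv_le_foldl_max (ls : List (List String)) :
    ∀ (b : Nat), b ≤ ls.foldl (fun acc line => max acc line.length) b := by
  induction ls with
  | nil => intro b; exact le_rfl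
  | cons x xs ih =>
    intro b
    simp only [List.foldl_cons]
    exact le_trans (le_max_left _ _) (ih _)

-- length of every line ≤ the computed n_elem
theorem pv_nelem_ge (lines : List (List String)) :
    ∀ line ∈ lines, line.length ≤ lines.foldl (fun acc line => max acc line.length) 0 := by
  suffices h : ∀ (a : Nat), ∀ line ∈ lines, line.length ≤ lines.foldl (fun acc line => max acc line.length) a from h 0
  induction lines with
  | nil => intro a line h; cases h
  | cons l ls ih =>
    intro a line hm
    simp only [List.foldl_cons]
    rcases List.mem_cons.mp hm with h | h
    · subst h
      exact le_trans (le_max_right _ _) (pv_le_foldl_max ls _)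
    · exact ih _ line h

-- ===== VERDICT (by name: the statement is the Claim_ definition above) =====
theorem calc_tab_list_spec : Claim_equal_calc_tab_list := by
  intro lines n0 _
  unfold Spec_calc_tab_list calc_tab_list calc_tab_list_alt
  set N := lines.foldl (fun acc line => max acc line.length) 0 with hN
  -- characterise A's n_list after the first two loops
  obtain ⟨ho1, ho2⟩ := pv_outer lines (List.replicate N 0)
    (by intro line hm; rw [List.length_replicate]; exact pv_nelem_ge lines line hm)
  set nl1 := lines.foldl
    (fun nl line => line.zipIdx.foldl
      (fun nl wi => nl.set wi.2 (max (nl.getD wi.2 0) ((wi.1.length : Int)))) nl)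
    (List.replicate N 0) with hnl1
  have hnl1j : ∀ j, nl1.getD j 0 = pvColMax lines j := by
    intro j
    rw [ho2 j, pvColMax]
    congr 1
    rcases Nat.lt_or_ge j N with h | h
    · simp [List.getD, h]
    · simp [List.getD, Nat.not_lt.mpr h]
  -- characterise A's n_list after the adjustment loop
  obtain ⟨ha1, ha2⟩ := pv_adj (N - 1) nl1 (by rw [ho1, List.length_replicate]; omega)
  set nl2 := (List.range (N - 1)).foldl
    (fun nl i => if nl.getD i 0 > 0 then nl.set i (nl.getD i 0 + 1) else nl) nl1 with hnl2
  have hnl2j : ∀ j, j < N - 1 → nl2.getD j 0 = pvStep lines j := by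
    intro j hj
    rw [ha2 j, if_pos hj, hnl1j j, pvStep]
    split
    · rfl
    · have := pvColMax_nonneg lines j
      omega
  -- the two final loops
  obtain ⟨ht1, _⟩ := pv_tabs (fun i => nl2.getD i 0) n0 (N - 1)
  simp only at ht1
  rw [ht1]
  -- the folds differ only in the step value; rewrite B's fold to use nl2
  clear ht1
  have : ∀ (tabs : List Int),
      (List.range (N - 1)).foldl (fun tabs i => tabs ++ [tabs.getLastD 0 + nl2.getD i 0]) tabs =
      (List.range (N - 1)).foldl (fun tabs i =>
        tabs ++ [tabs.getLastD 0 +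
          (if (lines.foldl (fun a line => if i < line.length then max a ((line.getD i "").length : Int) else a) 0) > 0
           then (lines.foldl (fun a line => if i < line.length then max a ((line.getD i "").length : Int) else a) 0) + 1
           else 0)]) tabs := by
    intro tabs
    apply PySem.List.foldl_congr_mem
    intro tabs' i hi
    have hi' : i < N - 1 := by simpa using (List.mem_range.mp hi)
    rw [hnl2j i hi', pvStep, pvColMax]
  exact this [n0]
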